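-- pv_equiv track=rewrite | github.com/dserious/UT2004_tools | map_screenshotter.py | get_all_entity_counts
-- ===== SOURCE A (Python) =====
-- def get_all_entity_counts(actors, entities):
--     entity_quantities = {}
--     for entity in entities:
--        entity_quantities[entity] = 0
--     for actor in actors:
--         for entity in entities:
--             if entity in actor:
--                 entity_quantities[entity] += 1
--     return entity_quantities
-- ===== SOURCE B (Python) =====
-- def get_all_entity_counts(actors, entities):
--     lengths = sorted({len(e) for e in entities})
--     index = {}
--     for actor in actors:
--         grams = set()
--         for m in lengths:
--             for i in range(len(actor) - m + 1):
--                 grams.add(actor[i:i + m])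
--         for g in grams:
--             index[g] = index.get(g, 0) + 1
--     counts = {}
--     for e in entities:
--         counts[e] = counts.get(e, 0) + index.get(e, 0)
--     return counts
-- ===== Notes on version B (the rewrite author's own statement) =====
-- stated objective: faster
-- what changed: instead of testing every (actor, entity) pair with substring containment, B builds per actor the set of its substrings whose lengths occur among the entities, aggregates them once into a counter dictionary, and answers every entity by a single dictionary lookup
import Mathlib
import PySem

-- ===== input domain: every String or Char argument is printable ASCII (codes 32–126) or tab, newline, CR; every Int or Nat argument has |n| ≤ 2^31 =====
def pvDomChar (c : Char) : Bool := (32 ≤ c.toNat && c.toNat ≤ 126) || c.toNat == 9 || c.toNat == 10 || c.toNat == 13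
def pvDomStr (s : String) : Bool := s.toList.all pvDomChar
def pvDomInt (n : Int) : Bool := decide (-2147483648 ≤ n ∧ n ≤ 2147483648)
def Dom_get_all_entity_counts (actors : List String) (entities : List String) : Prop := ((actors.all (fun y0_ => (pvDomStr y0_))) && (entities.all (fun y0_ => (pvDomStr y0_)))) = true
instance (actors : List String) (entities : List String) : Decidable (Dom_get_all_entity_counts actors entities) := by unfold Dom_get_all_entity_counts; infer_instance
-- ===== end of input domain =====

-- B replaces A's per-(actor, entity) containment scan by an n-gram index: per actor it collects
-- the set of substrings whose length occurs among the entities, aggregates them in one counter,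
-- and answers each entity by dictionary lookup, removing the per-(actor, entity) scan (objective: faster).


-- ===== PORT A =====
-- 'entity_quantities[entity] += 1' is ported as modify with default 0: the key is always
-- present at that point (every entity was initialised to 0 in the first loop), so this is exact.
def get_all_entity_counts (actors : List String) (entities : List String) : List (String × Int) :=
  let init : PySem.Dict String Int := entities.foldl (fun d e => d.insert e 0) PySem.Dict.empty
  (actors.foldl (fun d actor =>
      entities.foldl (fun d e =>
        if PySem.Str.isIn e actor then d.modify e 0 (fun x => x + 1) else d) d) init).items

-- ===== PORT B =====
-- the set comprehension {actor[i:i+m] for m in lengths for i in range(len(actor)-m+1)}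
def pvGrams (lengths : List Int) (actor : String) : PySem.Set String :=
  lengths.foldl (fun g m =>
    (PySem.List.pyRange 0 (PySem.Str.len actor - m + 1)).foldl (fun g i =>
      PySem.Set.add g (PySem.Str.slice actor (some i) (some (i + m)))) g) PySem.Set.empty

-- the 'index' counter over grams is consumed only by .get lookups, so the set's iteration
-- order cannot influence the result (ported by iterating the Set's element list).
def get_all_entity_counts_alt (actors : List String) (entities : List String) : List (String × Int) :=
  let lengths : List Int :=
    PySem.List.sorted (PySem.Set.ofList (entities.map PySem.Str.len)) (fun m => m) false
  let index : PySem.Dict String Int :=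
    actors.foldl (fun d a =>
      (pvGrams lengths a).foldl (fun d g => d.insert g (d.getD g 0 + 1)) d) PySem.Dict.empty
  (entities.foldl (fun d e => d.insert e (d.getD e 0 + index.getD e 0)) PySem.Dict.empty).items

-- ===== PRECONDITION & SPEC =====
-- A is total, so no Pre_ is needed.
def Spec_get_all_entity_counts (actors : List String) (entities : List String) (out : List (String × Int)) : Prop := out = get_all_entity_counts_alt actors entities
instance (actors : List String) (entities : List String) (out : List (String × Int)) : Decidable (Spec_get_all_entity_counts actors entities out) := by unfold Spec_get_all_entity_counts; infer_instance

-- ===== CLAIM (what is proved, stated in full; the proofs are below) =====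
def Claim_equal_get_all_entity_counts : Prop := ∀ (actors : List String) (entities : List String), Dom_get_all_entity_counts actors entities → Spec_get_all_entity_counts actors entities (get_all_entity_counts actors entities)

-- ===== LEMMAS AND PROOFS =====

-- Membership in a fold that adds f x for every x of l into a Set.
theorem pv_mem_addfold {α β : Type} [BEq β] [LawfulBEq β] (l : List α) (f : α → β)
    (s : PySem.Set β) (v : β) :
    v ∈ l.foldl (fun s x => PySem.Set.add s (f x)) s ↔ v ∈ s ∨ ∃ x ∈ l, f x = v := by
  induction l generalizing s with
  | nil => simp
  | cons x rest ih =>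
    simp only [List.foldl_cons, ih, PySem.Set.mem_add]
    constructor
    · rintro (⟨h | h⟩ | ⟨y, hy, hfy⟩)
      · exact Or.inl h
      · exact Or.inr ⟨x, by simp, h.symm⟩
      · exact Or.inr ⟨y, by simp [hy], hfy⟩
    · rintro (h | ⟨y, hy, hfy⟩)
      · exact Or.inl (Or.inl h)
      · rcases List.mem_cons.mp hy with rfl | hy'
        · exact Or.inl (Or.inr hfy.symm)
        · exact Or.inr ⟨y, hy', hfy⟩

-- Such a fold preserves Nodup.
theorem pv_nodup_addfold {α β : Type} [BEq β] [LawfulBEq β] (l : List α) (f : α → β)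
    (s : PySem.Set β) (h : s.Nodup) :
    (l.foldl (fun s x => PySem.Set.add s (f x)) s).Nodup := by
  induction l generalizing s with
  | nil => exact h
  | cons x rest ih => exact ih _ (PySem.Set.nodup_add s (f x) h)

-- Membership in an actor's gram set (general initial set, for the induction).
theorem pv_mem_grams_aux (lengths : List Int) (a : String) (v : String) (g : PySem.Set String) :
    v ∈ lengths.foldl (fun g m =>
        (PySem.List.pyRange 0 (PySem.Str.len a - m + 1)).foldl (fun g i =>
          PySem.Set.add g (PySem.Str.slice a (some i) (some (i + m)))) g) g ↔
      v ∈ g ∨ ∃ m ∈ lengths, ∃ i ∈ PySem.List.pyRange 0 (PySem.Str.len a - m + 1),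
        PySem.Str.slice a (some i) (some (i + m)) = v := by
  induction lengths generalizing g with
  | nil => simp
  | cons m rest ih =>
    simp only [List.foldl_cons]
    rw [ih, pv_mem_addfold]
    constructor
    · rintro (⟨h | ⟨i, hi, hv⟩⟩ | ⟨m', hm', hrest⟩)
      · exact Or.inl h
      · exact Or.inr ⟨m, by simp, i, hi, hv⟩
      · exact Or.inr ⟨m', by simp [hm'], hrest⟩
    · rintro (h | ⟨m', hm', hrest⟩)
      · exact Or.inl (Or.inl h)
      · rcases List.mem_cons.mp hm' with rfl | hm''
        · exact Or.inl (Or.inr hrest)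
        · exact Or.inr ⟨m', hm'', hrest⟩

theorem pv_mem_grams (lengths : List Int) (a : String) (v : String) :
    v ∈ pvGrams lengths a ↔
      ∃ m ∈ lengths, ∃ i ∈ PySem.List.pyRange 0 (PySem.Str.len a - m + 1),
        PySem.Str.slice a (some i) (some (i + m)) = v := by
  unfold pvGrams
  rw [pv_mem_grams_aux]
  simp [PySem.Set.empty]

theorem pv_nodup_grams_aux (lengths : List Int) (a : String) (g : PySem.Set String)
    (h : g.Nodup) :
    (lengths.foldl (fun g m =>
        (PySem.List.pyRange 0 (PySem.Str.len a - m + 1)).foldl (fun g i =>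
          PySem.Set.add g (PySem.Str.slice a (some i) (some (i + m)))) g) g).Nodup := by
  induction lengths generalizing g with
  | nil => exact h
  | cons m rest ih =>
    exact ih _ (pv_nodup_addfold _ _ _ h)

theorem pv_nodup_grams (lengths : List Int) (a : String) : (pvGrams lengths a).Nodup :=
  pv_nodup_grams_aux lengths a PySem.Set.empty List.nodup_nil

-- An entity's gram-set membership is Python's 'entity in actor', provided its length is indexed.
theorem pv_grams_isIn (lengths : List Int) (a e : String)
    (hlen : PySem.Str.len e ∈ lengths) (hnn : ∀ m ∈ lengths, 0 ≤ m) :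
    (e ∈ pvGrams lengths a) ↔ PySem.Str.isIn e a = true := by
  rw [pv_mem_grams, PySem.Str.isIn_iff_infix]
  constructor
  · rintro ⟨m, hm, i, hi, hslice⟩
    have hm0 : 0 ≤ m := hnn m hm
    have hi0 : 0 ≤ i := ((PySem.List.mem_pyRange_one).mp hi).1
    have htl : e.toList = (a.toList.drop i.toNat).take m.toNat := by
      rw [← hslice, PySem.Str.toList_slice, PySem.Chars.slice_eq_listSlice]
      rw [show i = ((i.toNat : Nat) : Int) from (Int.toNat_of_nonneg hi0).symm,
          show m = ((m.toNat : Nat) : Int) from (Int.toNat_of_nonneg hm0).symm,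
          PySem.List.slice_natCast_add, Int.toNat_natCast, Int.toNat_natCast]
    rw [htl]
    exact ((List.take_prefix _ _).isInfix).trans ((List.drop_suffix _ _).isInfix)
  · rintro ⟨s, t, hst⟩
    refine ⟨PySem.Str.len e, hlen, (s.length : Int), ?_, ?_⟩
    · rw [PySem.List.mem_pyRange_one]
      have hlen_a : a.toList.length = s.length + e.toList.length + t.length := by
        rw [← hst]; simp; omega
      rw [PySem.Str.len_eq, PySem.Str.len_eq]
      constructor
      · positivity
      · omega
    · apply String.toList_inj.mp
      rw [PySem.Str.toList_slice, PySem.Chars.slice_eq_listSlice, PySem.Str.len_eq,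
          show ((s.length : Int) + (e.toList.length : Int))
            = ((s.length : Nat) : Int) + ((e.toList.length : Nat) : Int) from rfl,
          PySem.List.slice_natCast_add, ← hst, List.append_assoc, List.drop_left,
          List.take_left]

-- The value at key v after the counter fold over one gram list.
theorem pv_counter_getD (l : List String) (d : PySem.Dict String Int) (v : String) :
    (l.foldl (fun d g => d.insert g (d.getD g 0 + 1)) d).getD v 0
      = d.getD v 0 + (l.count v : Int) := by
  induction l generalizing d with
  | nil => simp
  | cons g rest ih =>
    simp only [List.foldl_cons]
    rw [ih, PySem.Dict.getD_insert]
    by_cases hv : v = g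
    · subst hv; simp; ring
    · have hgv : ¬ g = v := fun h => hv h.symm
      simp [hv, hgv]

-- The aggregated index counts, at key e, the actors whose gram set contains e.
theorem pv_index_getD (lengths : List Int) (actors : List String)
    (d : PySem.Dict String Int) (e : String) :
    (actors.foldl (fun d a =>
        (pvGrams lengths a).foldl (fun d g => d.insert g (d.getD g 0 + 1)) d) d).getD e 0
      = d.getD e 0 + (actors.countP (fun a => decide (e ∈ pvGrams lengths a)) : Int) := by
  induction actors generalizing d with
  | nil => simp
  | cons a rest ih =>
    simp only [List.foldl_cons]
    rw [ih, pv_counter_getD]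
    have hcnt : ((pvGrams lengths a).count e : Int)
        = if e ∈ pvGrams lengths a then 1 else 0 := by
      by_cases hm : e ∈ pvGrams lengths a
      · rw [List.count_eq_one_of_mem (pv_nodup_grams lengths a) hm, if_pos hm]; rfl
      · rw [List.count_eq_zero.mpr hm, if_neg hm]; rfl
    rw [hcnt]
    by_cases hm : e ∈ pvGrams lengths a
    · simp [hm]; ring
    · simp [hm]

-- ==== A-side lemmas (as in the direct proof): value and keys of A's dict ====

theorem pvA_inner (entities : List String) (a : String) (d : PySem.Dict String Int) :
    entities.foldl (fun d e => if PySem.Str.isIn e a then d.modify e 0 (fun x => x + 1) else d) d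
      = (entities.filter (fun e => PySem.Str.isIn e a)).foldl (fun d e => d.modify e 0 (fun x => x + 1)) d :=
  PySem.List.foldl_if_eq_foldl_filter _ _ _ _

theorem pvA_keys (entities : List String) (actors : List String) (d : PySem.Dict String Int)
    (h : ∀ e ∈ entities, e ∈ d.keys) :
    (actors.foldl (fun d actor =>
        entities.foldl (fun d e =>
          if PySem.Str.isIn e actor then d.modify e 0 (fun x => x + 1) else d) d) d).keys = d.keys := by
  induction actors generalizing d with
  | nil => rfl
  | cons a rest ih =>
    simp only [List.foldl_cons]
    have hstep : (entities.foldl (fun d e =>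
        if PySem.Str.isIn e a then d.modify e 0 (fun x => x + 1) else d) d).keys = d.keys := by
      rw [pvA_inner, PySem.Dict.keys_foldl_modify, PySem.Set.update_eq_append_filter]
      have : (PySem.Set.ofList (entities.filter (fun e => PySem.Str.isIn e a))).filter
          (fun y => !PySem.Set.contains d.keys y) = [] := by
        rw [List.filter_eq_nil_iff]
        intro y hy
        have hy' : y ∈ entities := by
          have := (PySem.Set.mem_ofList _ _).mp hy
          exact (List.mem_filter.mp this).1
        have hmem := h y hy'
        simp [hmem]
      rw [this, List.append_nil]
    rw [← hstep] at h ⊢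
    exact ih _ h

theorem pvA_getD (entities : List String) (actors : List String) (d : PySem.Dict String Int) (e : String) :
    (actors.foldl (fun d actor =>
        entities.foldl (fun d e =>
          if PySem.Str.isIn e actor then d.modify e 0 (fun x => x + 1) else d) d) d).getD e 0
      = d.getD e 0 + (actors.map (fun a => ((entities.filter (fun x => PySem.Str.isIn x a)).count e : Int))).sum := by
  induction actors generalizing d with
  | nil => simp
  | cons a rest ih =>
    simp only [List.foldl_cons, List.map_cons, List.sum_cons]
    rw [ih, pvA_inner, PySem.Dict.getD_foldl_modify_add_one]
    ring

theorem pvInit_getD (l : List String) (d : PySem.Dict String Int)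
    (h : ∀ k, d.getD k 0 = 0) (v : String) :
    (l.foldl (fun d e => d.insert e (0 : Int)) d).getD v 0 = 0 := by
  induction l generalizing d with
  | nil => exact h v
  | cons e rest ih =>
    simp only [List.foldl_cons]
    refine ih _ (fun k => ?_)
    rw [PySem.Dict.getD_insert]
    split_ifs
    · rfl
    · exact h k

-- The value at key v after B's accumulating insert loop (c e does not depend on the dict).
theorem pvB_getD (c : String → Int) (l : List String) (d : PySem.Dict String Int) (v : String) :
    (l.foldl (fun d e => d.insert e (d.getD e 0 + c e)) d).getD v 0
      = d.getD v 0 + (l.count v : Int) * c v := by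
  induction l generalizing d with
  | nil => simp
  | cons e rest ih =>
    simp only [List.foldl_cons]
    rw [ih, PySem.Dict.getD_insert]
    by_cases hv : v = e
    · subst hv
      simp
      ring
    · have hev : ¬ e = v := fun h => hv h.symm
      simp [hv, hev]

theorem pvCount_filter (entities : List String) (e a : String) :
    ((entities.filter (fun x => PySem.Str.isIn x a)).count e : Int)
      = if PySem.Str.isIn e a then (entities.count e : Int) else 0 := by
  by_cases hp : PySem.Str.isIn e a = true
  · rw [if_pos hp, List.count_filter (p := fun x => PySem.Str.isIn x a) hp]
  · have hz : List.count e (List.filter (fun x => PySem.Str.isIn x a) entities) = 0 :=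
      List.count_eq_zero.mpr (fun hmem => hp (List.mem_filter.mp hmem).2)
    rw [if_neg hp, hz]
    rfl

-- Main computation.
theorem get_all_entity_counts_eq (actors : List String) (entities : List String) :
    get_all_entity_counts actors entities = get_all_entity_counts_alt actors entities := by
  unfold get_all_entity_counts get_all_entity_counts_alt
  dsimp only
  set L : List Int :=
    PySem.List.sorted (PySem.Set.ofList (entities.map PySem.Str.len)) (fun m => m) false with hLdef
  have hmemL : ∀ e ∈ entities, PySem.Str.len e ∈ L := by
    intro e he
    have h1 : PySem.Str.len e ∈ PySem.Set.ofList (entities.map PySem.Str.len) :=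
      (PySem.Set.mem_ofList _ _).mpr (List.mem_map.mpr ⟨e, he, rfl⟩)
    exact ((PySem.List.sorted_perm _ _ _).mem_iff).mpr h1
  have hnnL : ∀ m ∈ L, 0 ≤ m := by
    intro m hm
    have h1 := ((PySem.List.sorted_perm _ _ _).mem_iff).mp hm
    obtain ⟨x, _, rfl⟩ := List.mem_map.mp ((PySem.Set.mem_ofList _ _).mp h1)
    rw [PySem.Str.len_eq]; positivity
  set idx : PySem.Dict String Int := actors.foldl (fun d a =>
      (pvGrams L a).foldl (fun d g => d.insert g (d.getD g 0 + 1)) d) PySem.Dict.empty with hidx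
  have hidxe : ∀ e ∈ entities,
      idx.getD e 0 = (actors.countP (fun a => PySem.Str.isIn e a) : Int) := by
    intro e he
    rw [hidx, pv_index_getD, PySem.Dict.getD_empty, zero_add]
    congr 1
    apply List.countP_congr
    intro a _
    simp [pv_grams_isIn L a e (hmemL e he) hnnL]
  set c : String → Int := fun e => idx.getD e 0 with hc
  -- keys of A's init dict and of B's output dict
  have hinit_keys : (entities.foldl (fun d e => d.insert e (0 : Int)) PySem.Dict.empty).keys
      = PySem.Set.ofList entities := by
    rw [PySem.Dict.keys_foldl_insert (f := fun _ _ => (0 : Int)), PySem.Dict.keys_empty]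
    rfl
  have hB_keys : (entities.foldl (fun d e => d.insert e (d.getD e 0 + c e)) PySem.Dict.empty).keys
      = PySem.Set.ofList entities := by
    rw [PySem.Dict.keys_foldl_insert (f := fun d e => d.getD e 0 + c e), PySem.Dict.keys_empty]
    rfl
  set dfin := actors.foldl (fun d actor =>
      entities.foldl (fun d e =>
        if PySem.Str.isIn e actor then d.modify e 0 (fun x => x + 1) else d) d)
      (entities.foldl (fun d e => d.insert e (0 : Int)) PySem.Dict.empty) with hdfin
  have hA_keys : dfin.keys = PySem.Set.ofList entities := by
    rw [hdfin, pvA_keys entities actors _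
      (by intro e he; rw [hinit_keys]; exact (PySem.Set.mem_ofList _ _).mpr he), hinit_keys]
  have hA_items : dfin.items
      = (PySem.Set.ofList entities).map (fun e => (e, dfin.getD e 0)) := by
    have := PySem.Dict.items_eq_map_keys dfin
      (by rw [hA_keys]; exact PySem.Set.nodup_ofList entities) 0
    rwa [hA_keys] at this
  have hB_items : (entities.foldl (fun d e => d.insert e (d.getD e 0 + c e)) PySem.Dict.empty).items
      = (PySem.Set.ofList entities).map (fun e =>
          (e, (entities.foldl (fun d e => d.insert e (d.getD e 0 + c e)) PySem.Dict.empty).getD e 0)) := by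
    have := PySem.Dict.items_eq_map_keys
      (entities.foldl (fun d e => d.insert e (d.getD e 0 + c e)) PySem.Dict.empty)
      (by rw [hB_keys]; exact PySem.Set.nodup_ofList entities) 0
    rwa [hB_keys] at this
  rw [hA_items, hB_items]
  apply List.map_congr_left
  intro e he
  have he' : e ∈ entities := (PySem.Set.mem_ofList _ _).mp he
  have hAv : dfin.getD e 0
      = (entities.count e : Int) * (actors.countP (fun a => PySem.Str.isIn e a) : Int) := by
    rw [hdfin, pvA_getD, pvInit_getD entities PySem.Dict.empty (fun k => PySem.Dict.getD_empty k 0) e,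
      zero_add]
    calc (actors.map (fun a => ((entities.filter (fun x => PySem.Str.isIn x a)).count e : Int))).sum
        = (actors.map (fun a => (entities.count e : Int) * (if PySem.Str.isIn e a then 1 else 0))).sum := by
          refine congrArg List.sum (List.map_congr_left (fun a _ => ?_))
          rw [pvCount_filter]
          by_cases hp : PySem.Str.isIn e a = true
          · rw [if_pos hp, if_pos hp, mul_one]
          · rw [if_neg hp, if_neg hp, mul_zero]
      _ = (entities.count e : Int) * (actors.map (fun a => if PySem.Str.isIn e a then (1 : Int) else 0)).sum :=
          PySem.List.sum_map_const_mul_int actors _ _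
      _ = (entities.count e : Int) * (actors.countP (fun a => PySem.Str.isIn e a) : Int) := by
          rw [PySem.List.sum_map_ite_one_zero]
  have hBv : (entities.foldl (fun d e => d.insert e (d.getD e 0 + c e)) PySem.Dict.empty).getD e 0
      = (entities.count e : Int) * (actors.countP (fun a => PySem.Str.isIn e a) : Int) := by
    rw [pvB_getD, PySem.Dict.getD_empty, zero_add]
    simp only [hc]
    rw [hidxe e he']
  rw [hAv, hBv]

-- ===== VERDICT (by name: the statement is the Claim_ definition above) =====
theorem get_all_entity_counts_spec : Claim_equal_get_all_entity_counts := by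
  intro actors entities _
  unfold Spec_get_all_entity_counts
  exact get_all_entity_counts_eq actors entities
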